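-- pv_equiv track=rewrite | github.com/metabig/challenges-codember-python | challenge04/ex4.py | check
-- ===== SOURCE A (Python) =====
-- def ndigits(number):
--     return len(str(number))
--
-- def nth_digit(number, n):
--     return int(str(number)[n])
--
-- def nth_lte_next_digit(number, n):
--     return nth_digit(number, n) <= nth_digit(number, n + 1)
--
-- def check(number):
--     # Clue 1
--     len_digits = ndigits(number)
--     if len_digits != 5:
--         return False
--
--     # Clue 2
--     # number has the number 5 repeated at least twice
--     if str(number).count("5") < 2:
--         return False
--
--     # Clue 3
--     for i in range(len_digits - 1):
--         if not nth_lte_next_digit(number, i):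
--             return False
--
--     return True
-- ===== SOURCE B (Python) =====
-- def check(number):
--     s = str(number)
--     if len(s) != 5:
--         return False
--     if s.count("5") < 2:
--         return False
--     return s == ''.join(sorted(s))
-- ===== Notes on version B (the rewrite author's own statement) =====
-- stated objective: idiomatic
-- what changed: The explicit adjacent-pair loop with int() digit extraction per index is replaced by a single sort-then-compare test (s == ''.join(sorted(s))), converting to string once.
import Mathlib
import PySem

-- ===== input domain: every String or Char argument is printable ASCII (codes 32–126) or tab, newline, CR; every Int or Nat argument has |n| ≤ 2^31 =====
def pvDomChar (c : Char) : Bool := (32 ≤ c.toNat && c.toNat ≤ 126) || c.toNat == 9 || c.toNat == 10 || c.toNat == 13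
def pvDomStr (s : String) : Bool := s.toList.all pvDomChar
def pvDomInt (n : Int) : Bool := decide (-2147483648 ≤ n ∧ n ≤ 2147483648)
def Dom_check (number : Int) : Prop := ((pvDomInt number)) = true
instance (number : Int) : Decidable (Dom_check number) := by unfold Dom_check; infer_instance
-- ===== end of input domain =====

-- B replaces A's per-index int() digit-pair loop by a single sort-then-compare test on the digit string (idiomatic; same cost).


-- ===== PORT A =====
def ndigits (number : Int) : Int := PySem.Str.len (PySem.Int.toStr number)

def nth_digit? (number n : Int) : Option Int :=
  (PySem.Str.pyGet? (PySem.Int.toStr number) n).bind (fun c => PySem.Int.ofChars? [c])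

def nth_lte_next? (number n : Int) : Option Bool :=
  (nth_digit? number n).bind (fun a => (nth_digit? number (n + 1)).map (fun b => decide (a ≤ b)))

-- A's clue-3 loop: 'for i in range(len_digits - 1): if not nth_lte_next_digit(number, i): return False'
-- (`none` is where Python's int('-') raises ValueError; those inputs are outside Pre_check)
def checkLoop (number : Int) : List Int → Bool
  | [] => true
  | i :: rest =>
    match nth_lte_next? number i with
    | some true => checkLoop number rest
    | _ => false

def check (number : Int) : Bool :=
  let len_digits := ndigits number
  if len_digits ≠ 5 then false
  else if PySem.Str.count (PySem.Int.toStr number) "5" < 2 then false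
  else checkLoop number (PySem.List.pyRange 0 (len_digits - 1) 1)

-- ===== PORT B =====
def check_alt (number : Int) : Bool :=
  let s := (PySem.Int.toStr number).toList
  if s.length ≠ 5 then false
  else if PySem.Chars.count s ['5'] < 2 then false
  else s == PySem.List.sorted s (fun c => c)

-- ===== PRECONDITION & SPEC =====
-- Pre_ excludes exactly the inputs where A raises ValueError: negative numbers whose str() has
-- length 5 and at least two '5's reach the digit loop, where int('-') raises.
def Pre_check (number : Int) : Prop :=
  ¬ (number < 0 ∧ PySem.Str.len (PySem.Int.toStr number) = 5
      ∧ 2 ≤ PySem.Str.count (PySem.Int.toStr number) "5")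
instance (number : Int) : Decidable (Pre_check number) := by unfold Pre_check; infer_instance

def pvWitness_check : Int := 55556

def Spec_check (number : Int) (out : Bool) : Prop := out = check_alt number
instance (number : Int) (out : Bool) : Decidable (Spec_check number out) := by unfold Spec_check; infer_instance

-- ===== CLAIM (what is proved, stated in full; the proofs are below) =====
def Claim_equal_check : Prop := ∀ (number : Int), Dom_check number → Pre_check number → Spec_check number (check number)

-- ===== LEMMAS AND PROOFS =====

lemma digitChar_isDigit : ∀ k : Fin 10, (Nat.digitChar k.val).isDigit = true := by decide

lemma toDigitsCore_digits (f : ℕ) : ∀ (n : ℕ) (l : List Char),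
    (∀ c ∈ l, c.isDigit = true) → ∀ c ∈ Nat.toDigitsCore 10 f n l, c.isDigit = true := by
  induction f with
  | zero => intro n l hl c hc; exact hl c hc
  | succ f ih =>
    intro n l hl c hc
    have hdig : (Nat.digitChar (n % 10)).isDigit = true :=
      digitChar_isDigit ⟨n % 10, Nat.mod_lt _ (by norm_num)⟩
    simp only [Nat.toDigitsCore] at hc
    split at hc
    · rcases List.mem_cons.1 hc with h | h
      · simpa [h] using hdig
      · exact hl c h
    · refine ih (n / 10) _ ?_ c hc
      intro c hc'
      rcases List.mem_cons.1 hc' with h | h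
      · simpa [h] using hdig
      · exact hl c h

lemma toChars_digits (n : Int) (hn : 0 ≤ n) :
    ∀ c ∈ PySem.Int.toChars n, c.isDigit = true := by
  intro c hc
  simp only [PySem.Int.toChars, if_neg (not_lt.2 hn), Nat.toDigits] at hc
  exact toDigitsCore_digits _ _ [] (by simp) c hc

lemma isDigit_bounds {c : Char} (h : c.isDigit = true) : 48 ≤ c.toNat ∧ c.toNat ≤ 57 := by
  simp only [Char.isDigit, Bool.and_eq_true, decide_eq_true_eq, ge_iff_le, UInt32.le_iff_toNat_le] at h
  exact h

lemma ofChars?_digit {c : Char} (h : c.isDigit = true) :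
    PySem.Int.ofChars? [c] = some ((c.toNat : Int) - 48) := by
  obtain ⟨h1, h2⟩ := isDigit_bounds h
  have key : ∀ k : Fin 10, PySem.Int.ofChars? [Char.ofNat (48 + k.val)] = some (k.val : Int) := by
    decide
  have hk := key ⟨c.toNat - 48, by omega⟩
  rw [show 48 + (c.toNat - 48) = c.toNat by omega, Char.ofNat_toNat] at hk
  rw [hk]
  have : ((c.toNat - 48 : ℕ) : ℤ) = (c.toNat : ℤ) - 48 := by omega
  simpa using this

lemma char_le_iff (c d : Char) : c ≤ d ↔ c.toNat ≤ d.toNat := by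
  rw [Char.le_def, UInt32.le_iff_toNat_le]; rfl

lemma sorted_id_eq_self_iff (xs : List Char) :
    PySem.List.sorted xs (fun c => c) = xs ↔ xs.Pairwise (· ≤ ·) := by
  constructor
  · intro h; have := PySem.List.sorted_pairwise xs (fun c : Char => c); rwa [h] at this
  · exact PySem.List.sorted_eq_self_of_pairwise xs _

lemma check_core (n : Int) (c0 c1 c2 c3 c4 : Char)
    (hs : (PySem.Int.toStr n).toList = [c0, c1, c2, c3, c4])
    (h : ∀ c ∈ [c0, c1, c2, c3, c4], c.isDigit = true) :
    checkLoop n [0, 1, 2, 3]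
      = ([c0, c1, c2, c3, c4] == PySem.List.sorted [c0, c1, c2, c3, c4] (fun c => c)) := by
  have h0 := ofChars?_digit (h c0 (by simp))
  have h1 := ofChars?_digit (h c1 (by simp))
  have h2 := ofChars?_digit (h c2 (by simp))
  have h3 := ofChars?_digit (h c3 (by simp))
  have h4 := ofChars?_digit (h c4 (by simp))
  have b0 := isDigit_bounds (h c0 (by simp))
  have b1 := isDigit_bounds (h c1 (by simp))
  have b2 := isDigit_bounds (h c2 (by simp))
  have b3 := isDigit_bounds (h c3 (by simp))
  have b4 := isDigit_bounds (h c4 (by simp))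
  rw [Bool.eq_iff_iff]
  simp only [checkLoop, nth_lte_next?, nth_digit?, PySem.Str.pyGet?, hs,
    PySem.Chars.pyGet?, PySem.List.pyGet?, PySem.List.pyIdx?]
  norm_num [h0, h1, h2, h3, h4]
  rw [show ([c0, c1, c2, c3, c4] = PySem.List.sorted [c0, c1, c2, c3, c4] (fun c => c))
        ↔ (PySem.List.sorted [c0, c1, c2, c3, c4] (fun c => c) = [c0, c1, c2, c3, c4]) from eq_comm,
     sorted_id_eq_self_iff]
  by_cases p01 : c0.toNat ≤ c1.toNat <;> by_cases p12 : c1.toNat ≤ c2.toNat <;>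
    by_cases p23 : c2.toNat ≤ c3.toNat <;> by_cases p34 : c3.toNat ≤ c4.toNat <;>
    simp [p01, p12, p23, p34, h2, h3, h4, List.pairwise_cons, char_le_iff] <;> omega

-- ===== VERDICT (by name: the statement is the Claim_ definition above) =====
theorem check_spec : Claim_equal_check := by
  intro n _ hpre
  unfold Spec_check check check_alt ndigits
  rw [PySem.Str.len_eq]
  simp only [PySem.Str.count, PySem.Int.toList_toStr]
  by_cases hlen : (PySem.Int.toChars n).length = 5
  · have hlen' : ((PySem.Int.toChars n).length : Int) = 5 := by exact_mod_cast hlen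
    by_cases hcnt : PySem.Chars.count (PySem.Int.toChars n) ['5'] ≤ 1
    · simp [hlen, hlen', hcnt]
    · have hn : 0 ≤ n := by
        by_contra hneg
        refine hpre ⟨by omega, by rw [PySem.Str.len_eq, PySem.Int.toList_toStr]; exact hlen',
          by simpa [PySem.Str.count, PySem.Int.toList_toStr] using Nat.lt_of_lt_of_le Nat.one_lt_two (not_le.1 hcnt)⟩
      have hdig := toChars_digits n hn
      obtain ⟨c0, c1, c2, c3, c4, hs⟩ :
          ∃ a b c d e, PySem.Int.toChars n = [a, b, c, d, e] := by
        revert hlen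
        rcases PySem.Int.toChars n with _ | ⟨a, _ | ⟨b, _ | ⟨c, _ | ⟨d, _ | ⟨e, _ | ⟨f, t⟩⟩⟩⟩⟩⟩ <;>
          intro hl <;>
          first
          | exact ⟨_, _, _, _, _, rfl⟩
          | (simp at hl)
      have hcore := check_core n c0 c1 c2 c3 c4 (by rw [PySem.Int.toList_toStr]; exact hs)
        (by rw [← hs]; exact hdig)
      rw [hlen', show PySem.List.pyRange 0 (5 - 1) 1 = [0, 1, 2, 3] from by decide]
      simp [hlen, hcnt, hcore, hs]
  · have hlen' : ((PySem.Int.toChars n).length : Int) ≠ 5 := by exact_mod_cast hlen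
    simp [hlen, hlen']
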